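-- pv_equiv track=rewrite | github.com/PedroJuanSoto/Diagonal-Test | true_recovery.py | r
-- ===== SOURCE A (Python) =====
-- def r_col(i,n):
-- 	if i > n:
-- 		return 0
-- 	elif i == 1:
-- 		return n
-- 	elif i <= n//2:
-- 		return 2*r_col(i,n//2)
-- 	elif i<= n:
-- 		return r_col(i-n//2,n//2)
-- 	else:
-- 		return 0
--
-- def r(i,n):
-- 	if i > n:
-- 		return 0
-- 	if i == 1:
-- 		return 1
-- 	elif i <= n//2:
-- 		return r(i,n//2)
-- 	elif i<= n:
-- 		return r_col(i-n//2,n//2) + r(i-n//2,n//2)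
-- ===== SOURCE B (Python) =====
-- def r(i, n):
--     # Single fused loop: every r_col call in the original shares the remaining
--     # path of r itself, so a single weighted counter S (sum of the pending
--     # r_col multipliers) suffices; no separate r_col function is needed.
--     S = 0
--     while True:
--         if i > n:
--             return 0
--         if i == 1:
--             return S * n + 1
--         h = n // 2
--         if i <= h:
--             S *= 2
--             n = h
--         elif i <= n:
--             S += 1
--             i -= h
--             n = h
-- ===== Notes on version B (the rewrite author's own statement) =====
-- stated objective: alternative
-- what changed: B eliminates the helper r_col entirely: since every r_col call shares the remaining halving path of r itself, a single while-loop carries one weighted counter S (sum of pending r_col multipliers, doubled on low-half steps, incremented on high-half steps) and returns S*n+1 at i==1.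
import Mathlib
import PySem

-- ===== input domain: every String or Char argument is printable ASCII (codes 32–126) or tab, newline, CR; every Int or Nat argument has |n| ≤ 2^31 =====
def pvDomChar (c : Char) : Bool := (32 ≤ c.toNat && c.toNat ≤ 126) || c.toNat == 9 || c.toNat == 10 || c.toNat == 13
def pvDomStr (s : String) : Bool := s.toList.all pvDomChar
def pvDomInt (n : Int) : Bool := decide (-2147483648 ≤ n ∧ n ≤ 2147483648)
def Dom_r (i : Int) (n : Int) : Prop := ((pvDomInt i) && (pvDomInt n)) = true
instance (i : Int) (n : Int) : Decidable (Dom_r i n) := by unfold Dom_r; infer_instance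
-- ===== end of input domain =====

-- B fuses A's two mutual recursions into one loop with a single weighted counter; same cost, different algorithm.

-- ===== PORT A =====
-- fuel makes the Python recursion total in Lean; inside Pre_r the fuel n.toNat+1 is never exhausted
-- (n stays ≥ 1 and strictly decreases on every recursive call).
def r_col_core : Nat → Int → Int → Int
  | 0, _, _ => 0
  | fuel+1, i, n =>
    if i > n then 0
    else if i = 1 then n
    else if i ≤ PySem.Int.floordiv n 2 then 2 * r_col_core fuel i (PySem.Int.floordiv n 2)
    else if i ≤ n then r_col_core fuel (i - PySem.Int.floordiv n 2) (PySem.Int.floordiv n 2)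
    else 0

def r_core : Nat → Int → Int → Int
  | 0, _, _ => 0
  | fuel+1, i, n =>
    if i > n then 0
    else if i = 1 then 1
    else if i ≤ PySem.Int.floordiv n 2 then r_core fuel i (PySem.Int.floordiv n 2)
    else if i ≤ n then
      r_col_core fuel (i - PySem.Int.floordiv n 2) (PySem.Int.floordiv n 2)
        + r_core fuel (i - PySem.Int.floordiv n 2) (PySem.Int.floordiv n 2)
    else 0  -- Python falls through to None here; unreachable since ¬(i > n) gives i ≤ n

def r (i : Int) (n : Int) : Int := r_core (n.toNat + 1) i n

-- ===== PORT B =====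
-- Source B's single while-loop; S is the sum of all pending r_col multipliers.
def r_fused : Nat → Int → Int → Int → Int
  | 0, _, _, _ => 0
  | fuel+1, S, i, n =>
    if i > n then 0
    else if i = 1 then S * n + 1
    else if i ≤ PySem.Int.floordiv n 2 then
      r_fused fuel (2 * S) i (PySem.Int.floordiv n 2)
    else if i ≤ n then
      r_fused fuel (S + 1) (i - PySem.Int.floordiv n 2) (PySem.Int.floordiv n 2)
    else r_fused fuel S i n  -- Python's while-loop repeats with unchanged state; unreachable (¬(i > n) gives i ≤ n)

def r_alt (i : Int) (n : Int) : Int := r_fused (n.toNat + 1) 0 i n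

-- ===== PRECONDITION & SPEC =====
-- Pre_r excludes exactly the inputs on which Python A recurses forever (RecursionError):
-- those with i ≤ n where i ≤ 0 or n ≤ 0 (halving then never escapes the n ≤ 0 region).
def Pre_r (i : Int) (n : Int) : Prop := i > n ∨ (1 ≤ i ∧ 1 ≤ n)
instance (i : Int) (n : Int) : Decidable (Pre_r i n) := by unfold Pre_r; infer_instance
def pvWitness_r : Int × Int := (3, 16)

def Spec_r (i : Int) (n : Int) (out : Int) : Prop := out = r_alt i n
instance (i : Int) (n : Int) (out : Int) : Decidable (Spec_r i n out) := by unfold Spec_r; infer_instance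

-- ===== CLAIM (what is proved, stated in full; the proofs are below) =====
def Claim_equal_r : Prop := ∀ (i : Int) (n : Int), Dom_r i n → Pre_r i n → Spec_r i n (r i n)

-- ===== LEMMAS AND PROOFS =====
-- Invariant: the fused loop with weight S computes S·r_col + r, at every fuel.
lemma fused_eq (fuel : Nat) : ∀ (S i n : Int),
    r_fused fuel S i n = S * r_col_core fuel i n + r_core fuel i n := by
  induction fuel with
  | zero => intro S i n; simp [r_fused, r_col_core, r_core]
  | succ f ih =>
    intro S i n
    simp only [r_fused, r_col_core, r_core]
    split_ifs with h1 h2 h3 h4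
    · ring
    · ring
    · rw [ih]; ring
    · rw [ih]; ring
    · omega  -- unreachable: ¬(i > n) contradicts ¬(i ≤ n)

-- ===== VERDICT (by name: the statement is the Claim_ definition above) =====
theorem r_spec : Claim_equal_r := by
  intro i n _ _
  unfold Spec_r r r_alt
  rw [fused_eq]
  ring
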